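-- pv_equiv track=rewrite | github.com/buggy18/buggy_ft | linepy/talk.py | listsimpanan
-- ===== SOURCE A (Python) =====
-- def listsimpanan(text,data={}):
--     if data == {}:
--         msgs = " 「 {} List 」\nNo {}".format(text,text)
--     else:
--         no=0
--         msgs=" 「 {} List 」\n{} List:".format(text,text)
--         for a in data:
--             no+=1
--             if no % 2 == 0:msgs+="  %i. %s" % (no, a)
--             else:msgs+="\n%i. %s" % (no, a)
--         msgs+="\n\nTotal {} List: {}".format(text,len(data))
--     return msgs
-- ===== SOURCE B (Python) =====
-- def listsimpanan(text, data={}):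
--     if data == {}:
--         return " 「 {} List 」\nNo {}".format(text, text)
--     keys = list(data)
--     parts = [" 「 {} List 」\n{} List:".format(text, text)]
--     for i in range(0, len(keys), 2):
--         if i + 1 < len(keys):
--             parts.append("\n%i. %s  %i. %s" % (i + 1, keys[i], i + 2, keys[i + 1]))
--         else:
--             parts.append("\n%i. %s" % (i + 1, keys[i]))
--     parts.append("\n\nTotal {} List: {}".format(text, len(keys)))
--     return "".join(parts)
-- ===== Notes on version B (the rewrite author's own statement) =====
-- stated objective: alternative
-- what changed: Replaces the per-element loop with a parity branch by a pairwise pass: keys are materialized and consumed two at a time, with one joined line per chunk and a join at the end instead of repeated string concatenation.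
import Mathlib
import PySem

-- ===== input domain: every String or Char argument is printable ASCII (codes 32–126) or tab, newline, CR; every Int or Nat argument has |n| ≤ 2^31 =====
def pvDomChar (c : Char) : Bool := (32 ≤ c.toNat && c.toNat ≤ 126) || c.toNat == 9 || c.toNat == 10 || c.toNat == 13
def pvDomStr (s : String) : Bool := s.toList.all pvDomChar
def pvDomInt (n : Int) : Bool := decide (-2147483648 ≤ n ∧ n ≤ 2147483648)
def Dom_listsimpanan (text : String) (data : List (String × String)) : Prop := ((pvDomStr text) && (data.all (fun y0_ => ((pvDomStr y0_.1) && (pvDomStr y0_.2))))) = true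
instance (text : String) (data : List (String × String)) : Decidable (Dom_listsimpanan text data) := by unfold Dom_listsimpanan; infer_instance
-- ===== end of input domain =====

-- ===== PORT A =====
-- one-line objective: B builds the listing two keys at a time and joins the parts; same exact output, different pass shape.
def listsimpanan (text : String) (data : List (String × String)) : String :=
  if data = [] then
    " 「 " ++ text ++ " List 」\nNo " ++ text
  else
    let msgs0 := " 「 " ++ text ++ " List 」\n" ++ text ++ " List:"
    let st := List.foldl (fun (st : Int × String) (a : String × String) =>
        let no := st.1 + 1
        if no % 2 = 0 then (no, st.2 ++ "  " ++ PySem.Int.toStr no ++ ". " ++ a.1)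
        else (no, st.2 ++ "\n" ++ PySem.Int.toStr no ++ ". " ++ a.1)) (0, msgs0) data
    st.2 ++ "\n\nTotal " ++ text ++ " List: " ++ PySem.Int.toStr (data.length : Int)

-- ===== PORT B =====
def pvChunks (i : Int) (keys : List String) : List String :=
  match keys with
  | [] => []
  | [a] => ["\n" ++ PySem.Int.toStr (i + 1) ++ ". " ++ a]
  | a :: b :: rest =>
      ("\n" ++ PySem.Int.toStr (i + 1) ++ ". " ++ a ++ "  " ++ PySem.Int.toStr (i + 2) ++ ". " ++ b)
        :: pvChunks (i + 2) rest

def listsimpanan_alt (text : String) (data : List (String × String)) : String :=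
  if data = [] then
    " 「 " ++ text ++ " List 」\nNo " ++ text
  else
    let keys := data.map Prod.fst
    let parts := (" 「 " ++ text ++ " List 」\n" ++ text ++ " List:")
        :: pvChunks 0 keys
        ++ ["\n\nTotal " ++ text ++ " List: " ++ PySem.Int.toStr (keys.length : Int)]
    List.foldl (· ++ ·) "" parts

-- ===== PRECONDITION & SPEC =====
def Spec_listsimpanan (text : String) (data : List (String × String)) (out : String) : Prop := out = listsimpanan_alt text data
instance (text : String) (data : List (String × String)) (out : String) : Decidable (Spec_listsimpanan text data out) := by unfold Spec_listsimpanan; infer_instance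

-- ===== CLAIM (what is proved, stated in full; the proofs are below) =====
def Claim_equal_listsimpanan : Prop := ∀ (text : String) (data : List (String × String)), Dom_listsimpanan text data → Spec_listsimpanan text data (listsimpanan text data)

-- ===== LEMMAS AND PROOFS =====

-- ===== VERDICT (by name: the statement is the Claim_ definition above) =====

def pvJoinL : List String → String
  | [] => ""
  | a :: t => a ++ pvJoinL t

lemma foldl_join (l : List String) (s : String) :
    List.foldl (· ++ ·) s l = s ++ pvJoinL l := by
  induction l generalizing s with
  | nil => simp [pvJoinL]
  | cons a t ih =>
    simp only [List.foldl, pvJoinL]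
    rw [ih (s ++ a)]
    simp [String.append_assoc]

lemma joinL_append (l1 l2 : List String) :
    pvJoinL (l1 ++ l2) = pvJoinL l1 ++ pvJoinL l2 := by
  induction l1 with
  | nil => simp [pvJoinL]
  | cons a t ih => simp [pvJoinL, ih, String.append_assoc]

lemma loop_eq_chunks : ∀ (l : List (String × String)) (i : Int) (s : String), i % 2 = 0 →
    (List.foldl (fun (st : Int × String) (a : String × String) =>
        let no := st.1 + 1
        if no % 2 = 0 then (no, st.2 ++ "  " ++ PySem.Int.toStr no ++ ". " ++ a.1)
        else (no, st.2 ++ "\n" ++ PySem.Int.toStr no ++ ". " ++ a.1))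
      (i, s) l).2
    = s ++ pvJoinL (pvChunks i (l.map Prod.fst))
  | [], i, s, _ => by simp [pvChunks, pvJoinL]
  | [a], i, s, hi => by
    simp only [List.foldl, List.map, pvChunks, pvJoinL]
    rw [if_neg (by omega : ¬ (i + 1) % 2 = 0)]
    simp [String.append_assoc]
  | a :: b :: rest, i, s, hi => by
    simp only [List.foldl, List.map, pvChunks, pvJoinL]
    rw [if_neg (by omega : ¬ (i + 1) % 2 = 0)]
    rw [if_pos (by omega : (i + 1 + 1) % 2 = 0)]
    rw [show i + 1 + 1 = i + 2 from by ring]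
    rw [loop_eq_chunks rest (i + 2) _ (by omega)]
    simp [String.append_assoc]

theorem listsimpanan_spec : Claim_equal_listsimpanan := by
  intro text data _
  unfold Spec_listsimpanan listsimpanan listsimpanan_alt
  by_cases h : data = []
  · simp [h]
  · simp only [if_neg h]
    rw [loop_eq_chunks data 0 _ (by decide)]
    rw [foldl_join, joinL_append]
    simp [pvJoinL, String.append_assoc]
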